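-- pv_equiv track=rewrite | github.com/saurav-thakur/100-Days-DSA-python- | Day 12/ValidShuffle.py | valid_shuffle
-- ===== SOURCE A (Python) =====
-- def valid_shuffle(s1,s2,res):
--     if len(s1) + len(s2) != len(res):
--         return False
--
--     i = 0
--     j = 0
--     k = 0
--
--     while k < len(res):
--
--         if i < len(s1) and s1[i] == res[k]:
--             i+=1
--         elif j < len(s2) and s2[j] == res[k]:
--             j+=1
--
--         k+=1
--
--     if i < len(s1) or j < len(s2):
--         return False
--     return True
-- ===== SOURCE B (Python) =====
-- def valid_shuffle(s1, s2, res):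
--     if len(s1) + len(s2) != len(res):
--         return False
--     # pass 1: greedily consume s1 from res; chars not taken go to leftover (in order)
--     i = 0
--     leftover = []
--     for c in res:
--         if i < len(s1) and s1[i] == c:
--             i += 1
--         else:
--             leftover.append(c)
--     # pass 2: greedily consume s2 from the leftover
--     j = 0
--     for c in leftover:
--         if j < len(s2) and s2[j] == c:
--             j += 1
--     return i == len(s1) and j == len(s2)
-- ===== Notes on version B (the rewrite author's own statement) =====
-- stated objective: alternative
-- what changed: Replaces the single interleaved three-pointer while-loop by two independent greedy passes: one matching s1 against res while collecting the unmatched leftover characters, then a second pass matching s2 against that leftover; valid iff both are fully consumed.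
import Mathlib
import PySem

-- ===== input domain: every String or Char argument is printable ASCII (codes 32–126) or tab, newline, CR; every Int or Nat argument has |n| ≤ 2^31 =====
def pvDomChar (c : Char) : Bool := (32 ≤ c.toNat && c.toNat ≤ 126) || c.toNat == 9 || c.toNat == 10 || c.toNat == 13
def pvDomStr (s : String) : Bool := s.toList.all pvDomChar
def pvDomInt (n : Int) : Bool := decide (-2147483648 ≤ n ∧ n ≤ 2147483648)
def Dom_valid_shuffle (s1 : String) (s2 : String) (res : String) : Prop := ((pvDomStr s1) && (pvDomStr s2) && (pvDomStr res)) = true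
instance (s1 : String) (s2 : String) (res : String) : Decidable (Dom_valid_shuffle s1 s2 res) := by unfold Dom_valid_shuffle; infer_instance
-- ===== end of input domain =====

-- B replaces A's single interleaved three-pointer loop by two independent greedy passes
-- (match s1 collecting the leftover, then match s2 on the leftover); same cost, alternative decomposition.

-- ===== PORT A =====
-- the while-loop over k with state (i, j); 'i < len(s1) and s1[i] == res[k]' is 'a[i]? = some c'
def vsLoopA (a b : List Char) : List Char → Nat → Nat → Nat × Nat
  | [], i, j => (i, j)
  | c :: rest, i, j =>
    if a[i]? = some c then vsLoopA a b rest (i + 1) j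
    else if b[j]? = some c then vsLoopA a b rest i (j + 1)
    else vsLoopA a b rest i j

def valid_shuffle (s1 : String) (s2 : String) (res : String) : Bool :=
  let a := s1.toList
  let b := s2.toList
  let r := res.toList
  if a.length + b.length ≠ r.length then false
  else
    let ij := vsLoopA a b r 0 0
    if ij.1 < a.length ∨ ij.2 < b.length then false else true

-- ===== PORT B =====
-- pass 1: greedily consume s1 from res, appending unmatched chars to the accumulator (Source B's leftover list)
def vsPass1 (a : List Char) : List Char → Nat → List Char → Nat × List Char
  | [], i, acc => (i, acc.reverse)
  | c :: rest, i, acc =>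
    if a[i]? = some c then vsPass1 a rest (i + 1) acc
    else vsPass1 a rest i (c :: acc)

-- pass 2: greedily consume s2 from the leftover
def vsPass2 (b : List Char) : List Char → Nat → Nat
  | [], j => j
  | c :: rest, j =>
    if b[j]? = some c then vsPass2 b rest (j + 1)
    else vsPass2 b rest j

def valid_shuffle_alt (s1 : String) (s2 : String) (res : String) : Bool :=
  let a := s1.toList
  let b := s2.toList
  let r := res.toList
  if a.length + b.length ≠ r.length then false
  else
    let il := vsPass1 a r 0 []
    let j := vsPass2 b il.2 0
    il.1 == a.length && j == b.length

-- ===== PRECONDITION & SPEC =====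
def Spec_valid_shuffle (s1 : String) (s2 : String) (res : String) (out : Bool) : Prop := out = valid_shuffle_alt s1 s2 res
instance (s1 : String) (s2 : String) (res : String) (out : Bool) : Decidable (Spec_valid_shuffle s1 s2 res out) := by unfold Spec_valid_shuffle; infer_instance

-- ===== CLAIM (what is proved, stated in full; the proofs are below) =====
def Claim_equal_valid_shuffle : Prop := ∀ (s1 : String) (s2 : String) (res : String), Dom_valid_shuffle s1 s2 res → Spec_valid_shuffle s1 s2 res (valid_shuffle s1 s2 res)

-- ===== LEMMAS AND PROOFS =====

-- the accumulator of pass 1 only prefixes (reversed) the leftover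
theorem vsPass1_acc (a : List Char) (r : List Char) :
    ∀ (i : Nat) (acc : List Char),
      vsPass1 a r i acc = ((vsPass1 a r i []).1, acc.reverse ++ (vsPass1 a r i []).2) := by
  induction r with
  | nil => intro i acc; simp [vsPass1]
  | cons c rest ih =>
    intro i acc
    by_cases h : a[i]? = some c
    · rw [show vsPass1 a (c :: rest) i acc = vsPass1 a rest (i + 1) acc from by
          simp only [vsPass1, if_pos h],
        show vsPass1 a (c :: rest) i [] = vsPass1 a rest (i + 1) [] from by
          simp only [vsPass1, if_pos h]]
      exact ih (i + 1) acc
    · rw [show vsPass1 a (c :: rest) i acc = vsPass1 a rest i (c :: acc) from by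
          simp only [vsPass1, if_neg h],
        show vsPass1 a (c :: rest) i [] = vsPass1 a rest i [c] from by
          simp only [vsPass1, if_neg h]]
      rw [ih i (c :: acc), ih i [c]]
      simp

-- A's interleaved loop equals pass 1 followed by pass 2
theorem vsLoopA_eq_passes (a b : List Char) (r : List Char) :
    ∀ (i j : Nat),
      vsLoopA a b r i j = ((vsPass1 a r i []).1, vsPass2 b (vsPass1 a r i []).2 j) := by
  induction r with
  | nil => intro i j; simp [vsLoopA, vsPass1, vsPass2]
  | cons c rest ih =>
    intro i j
    by_cases h1 : a[i]? = some c
    · rw [show vsLoopA a b (c :: rest) i j = vsLoopA a b rest (i + 1) j from by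
          simp only [vsLoopA, if_pos h1],
        show vsPass1 a (c :: rest) i [] = vsPass1 a rest (i + 1) [] from by
          simp only [vsPass1, if_pos h1]]
      exact ih (i + 1) j
    · rw [show vsPass1 a (c :: rest) i [] = vsPass1 a rest i [c] from by
          simp only [vsPass1, if_neg h1],
        vsPass1_acc a rest i [c]]
      simp only [List.reverse_cons, List.reverse_nil, List.nil_append, List.cons_append]
      by_cases h2 : b[j]? = some c
      · rw [show vsLoopA a b (c :: rest) i j = vsLoopA a b rest i (j + 1) from by
            simp only [vsLoopA, if_neg h1, if_pos h2],
          show vsPass2 b (c :: (vsPass1 a rest i []).2) j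
              = vsPass2 b (vsPass1 a rest i []).2 (j + 1) from by
            simp only [vsPass2, if_pos h2]]
        exact ih i (j + 1)
      · rw [show vsLoopA a b (c :: rest) i j = vsLoopA a b rest i j from by
            simp only [vsLoopA, if_neg h1, if_neg h2],
          show vsPass2 b (c :: (vsPass1 a rest i []).2) j
              = vsPass2 b (vsPass1 a rest i []).2 j from by
            simp only [vsPass2, if_neg h2]]
        exact ih i j

-- the pointers never pass the ends of their strings
theorem vsLoopA_le (a b : List Char) (r : List Char) :
    ∀ (i j : Nat), i ≤ a.length → j ≤ b.length →
      (vsLoopA a b r i j).1 ≤ a.length ∧ (vsLoopA a b r i j).2 ≤ b.length := by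
  induction r with
  | nil => intro i j hi hj; exact ⟨hi, hj⟩
  | cons c rest ih =>
    intro i j hi hj
    by_cases h1 : a[i]? = some c
    · have : i < a.length := (List.getElem?_eq_some_iff.mp h1).1
      simp only [vsLoopA, if_pos h1]
      exact ih (i + 1) j (by omega) hj
    · by_cases h2 : b[j]? = some c
      · have : j < b.length := (List.getElem?_eq_some_iff.mp h2).1
        simp only [vsLoopA, if_neg h1, if_pos h2]
        exact ih i (j + 1) hi (by omega)
      · simp only [vsLoopA, if_neg h1, if_neg h2]
        exact ih i j hi hj

-- ===== VERDICT (by name: the statement is the Claim_ definition above) =====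
theorem valid_shuffle_spec : Claim_equal_valid_shuffle := by
  intro s1 s2 res _
  unfold Spec_valid_shuffle valid_shuffle valid_shuffle_alt
  set a := s1.toList with ha
  set b := s2.toList with hb
  set r := res.toList with hr
  by_cases hlen : a.length + b.length ≠ r.length
  · rw [if_pos hlen, if_pos hlen]
  · rw [if_neg hlen, if_neg hlen]
    rw [vsLoopA_eq_passes]
    have hle := vsLoopA_le a b r 0 0 (by omega) (by omega)
    rw [vsLoopA_eq_passes] at hle
    obtain ⟨h1, h2⟩ := hle
    simp only at h1 h2
    by_cases hc : (vsPass1 a r 0 []).1 < a.length ∨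
        vsPass2 b (vsPass1 a r 0 []).2 0 < b.length
    · rw [if_pos hc]
      symm
      simp only [Bool.and_eq_false_iff, beq_eq_false_iff_ne, ne_eq]
      omega
    · rw [if_neg hc]
      symm
      simp only [Bool.and_eq_true, beq_iff_eq]
      omega
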